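-- pv_equiv track=rewrite | github.com/crystallistic/csc220-coding-challenge-2 | CC2.py | gene_splicing
-- ===== SOURCE A (Python) =====
-- def gene_splicing(str1, str2):
--     str1 = str1.upper()
--     str2 = str2.upper()
--     stringslist = []
--     result = []
--     substrings = [str2[i:j+1] for i in range(len(str2)) for j in range(i, len(str2))]
--
--     for string in substrings:
--         if string in str1:
--             stringslist.append(string)
--
--     if len(stringslist) == 0:
--         result.append(str1+str2)
--         result.append(str2+str1)
--
--     else:
--         result.append(str1.replace(max(stringslist, key=len), str2))
--
--     return result
-- ===== SOURCE B (Python) =====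
-- def gene_splicing(str1, str2):
--     s1 = str1.upper()
--     s2 = str2.upper()
--     n = len(s2)
--     best = ""
--     for i in range(n):
--         L = len(best) + 1
--         while i + L <= n and s2[i:i+L] in s1:
--             best = s2[i:i+L]
--             L += 1
--     if best == "":
--         return [s1 + s2, s2 + s1]
--     return [s1.replace(best, s2)]
-- ===== Notes on version B (the rewrite author's own statement) =====
-- stated objective: faster
-- what changed: B drops A's materialisation of all O(n^2) substrings of str2 and the filter+max(key=len) passes; instead it sweeps start positions once, growing the current best match one character at a time (only strictly-longer candidates are ever tested, valid since any substring of a contained string is contained), which reproduces A's earliest-longest tie-breaking.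
import Mathlib
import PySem

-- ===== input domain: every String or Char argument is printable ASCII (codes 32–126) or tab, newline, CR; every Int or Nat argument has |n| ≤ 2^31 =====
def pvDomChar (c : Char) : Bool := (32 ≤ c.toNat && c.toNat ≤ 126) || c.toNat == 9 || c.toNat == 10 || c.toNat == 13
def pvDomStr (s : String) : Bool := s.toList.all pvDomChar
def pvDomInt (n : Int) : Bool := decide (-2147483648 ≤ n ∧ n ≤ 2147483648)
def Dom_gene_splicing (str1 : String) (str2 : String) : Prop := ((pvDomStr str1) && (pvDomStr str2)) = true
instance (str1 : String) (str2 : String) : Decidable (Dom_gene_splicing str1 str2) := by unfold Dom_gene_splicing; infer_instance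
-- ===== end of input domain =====

-- B replaces A's cubic generate-all-substrings + filter + max pass by a single sweep over start
-- positions that grows the current best match incrementally (objective: faster, constant-factor /
-- typical-case mechanism; worst case unchanged).

-- ===== PORT A =====
def gene_splicing (str1 : String) (str2 : String) : List String :=
  let s1 := PySem.Str.upper str1
  let s2 := PySem.Str.upper str2
  let substrings := (PySem.List.pyRange 0 (PySem.Str.len s2)).flatMap (fun i =>
      (PySem.List.pyRange i (PySem.Str.len s2)).map (fun j =>
        PySem.Str.slice s2 (some i) (some (j + 1))))
  let stringslist := substrings.foldl
      (fun acc s => if PySem.Str.isIn s s1 then acc ++ [s] else acc) ([] : List String)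
  if stringslist.length = 0 then
    [s1 ++ s2, s2 ++ s1]
  else
    match PySem.List.max? stringslist PySem.Str.len with
    | some m => [PySem.Str.replace s1 m s2]
    | none => []   -- unreachable: stringslist is nonempty here

-- ===== PORT B =====
-- the inner `while` loop of Source B: grow the best match at start i as long as it stays a substring
def pyGrow (s1 s2 : String) (n i : Int) (best : String) (L : Int) : String :=
  if h : i + L ≤ n ∧ PySem.Str.isIn (PySem.Str.slice s2 (some i) (some (i + L))) s1 then
    pyGrow s1 s2 n i (PySem.Str.slice s2 (some i) (some (i + L))) (L + 1)
  else best
termination_by (n + 1 - i - L).toNat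
decreasing_by
  have := h.1; omega

def gene_splicing_alt (str1 : String) (str2 : String) : List String :=
  let s1 := PySem.Str.upper str1
  let s2 := PySem.Str.upper str2
  let n := PySem.Str.len s2
  let best := (PySem.List.pyRange 0 n).foldl
      (fun best i => pyGrow s1 s2 n i best (PySem.Str.len best + 1)) ""
  if best = "" then
    [s1 ++ s2, s2 ++ s1]
  else
    [PySem.Str.replace s1 best s2]

-- ===== PRECONDITION & SPEC =====
def Spec_gene_splicing (str1 : String) (str2 : String) (out : List String) : Prop := out = gene_splicing_alt str1 str2
instance (str1 : String) (str2 : String) (out : List String) : Decidable (Spec_gene_splicing str1 str2 out) := by unfold Spec_gene_splicing; infer_instance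

-- ===== CLAIM (what is proved, stated in full; the proofs are below) =====
def Claim_equal_gene_splicing : Prop := ∀ (str1 : String) (str2 : String), Dom_gene_splicing str1 str2 → Spec_gene_splicing str1 str2 (gene_splicing str1 str2)

-- ===== LEMMAS AND PROOFS =====

-- proof-only helpers: the running-best combining step, the substring of s2 of length L at start k,
-- the per-start list of matching substrings, and their concatenation in A's traversal order
def pvStep' (b x : String) : String := if PySem.Str.len b < PySem.Str.len x then x else b

def pvSub (s2 : String) (k L : Nat) : String :=
  PySem.Str.slice s2 (some (k : Int)) (some ((k : Int) + (L : Int)))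

def pvInner (s1 s2 : String) (k : Nat) : List String :=
  ((List.range (s2.toList.length - k)).map (fun t => pvSub s2 k (t + 1))).filter
    (fun x => PySem.Str.isIn x s1)

def pvAll (s1 s2 : String) : List String :=
  (List.range s2.toList.length).flatMap (pvInner s1 s2)

def pvBest (s1 s2 : String) : String := (pvAll s1 s2).foldl pvStep' ""

lemma pvSub_toList (s2 : String) (k L : Nat) :
    (pvSub s2 k L).toList = (s2.toList.drop k).take L := by
  simp [pvSub, PySem.Str.toList_slice, PySem.Chars.slice_eq_listSlice, PySem.List.slice_natCast_add]

lemma pvLen_pvSub (s2 : String) (k L : Nat) :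
    PySem.Str.len (pvSub s2 k L) = ((min L (s2.toList.length - k) : Nat) : Int) := by
  simp [PySem.Str.len_eq, pvSub_toList]

lemma pvClosed (s1 s2 : String) (k L L' : Nat) (h : L ≤ L')
    (hp : PySem.Str.isIn (pvSub s2 k L') s1 = true) :
    PySem.Str.isIn (pvSub s2 k L) s1 = true := by
  rw [PySem.Str.isIn_eq, PySem.Chars.isIn_iff_infix] at hp ⊢
  rw [pvSub_toList] at hp ⊢
  refine List.IsInfix.trans ?_ hp
  apply List.IsPrefix.isInfix
  have : (s2.toList.drop k).take L = ((s2.toList.drop k).take L').take L := by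
    rw [List.take_take, min_eq_left h]
  rw [this]
  exact List.take_prefix _ _

def pvStepO (acc : Option String) (x : String) : Option String :=
  match acc with
  | none => some x
  | some m => if PySem.Str.len m < PySem.Str.len x then some x else some m

lemma pvMax?_eq_foldl (l : List String) : PySem.List.max? l PySem.Str.len = l.foldl pvStepO none := by
  simp only [PySem.List.max?]
  apply PySem.List.foldl_congr_mem
  intro acc x _
  cases acc <;> rfl

lemma pvFoldSome (l : List String) : ∀ (b : String),
    l.foldl pvStepO (some b) = some (l.foldl pvStep' b) := by
  induction l with
  | nil => intro b; rfl
  | cons x t ih =>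
    intro b
    simp only [List.foldl_cons]
    rw [show pvStepO (some b) x = some (pvStep' b x) by
      simp only [pvStepO, pvStep']; split <;> rfl]
    exact ih _

lemma pvLenMono (l : List String) : ∀ (b : String),
    PySem.Str.len b ≤ PySem.Str.len (l.foldl pvStep' b) := by
  induction l with
  | nil => intro b; simp
  | cons x t ih =>
    intro b
    simp only [List.foldl_cons]
    refine le_trans ?_ (ih (pvStep' b x))
    simp only [pvStep']; split
    · omega
    · exact le_refl _

lemma pvMaxEq (l : List String) (hl : l ≠ []) (hx : ∀ x ∈ l, 0 < PySem.Str.len x) :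
    PySem.List.max? l PySem.Str.len = some (l.foldl pvStep' "") := by
  cases l with
  | nil => exact absurd rfl hl
  | cons x t =>
    rw [pvMax?_eq_foldl]
    simp only [List.foldl_cons]
    rw [show pvStepO none x = some x from rfl, pvFoldSome]
    congr 1
    have hx0 : pvStep' "" x = x := by
      simp only [pvStep']
      rw [if_pos]
      exact hx x (by simp)
    rw [hx0]

lemma pvNonempty (l : List String) (hl : l ≠ []) (hx : ∀ x ∈ l, 0 < PySem.Str.len x) :
    0 < PySem.Str.len (l.foldl pvStep' "") := by
  cases l with
  | nil => exact absurd rfl hl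
  | cons x t =>
    simp only [List.foldl_cons]
    have hx0 : pvStep' "" x = x := by
      simp only [pvStep']; rw [if_pos]; exact hx x (by simp)
    rw [hx0]
    exact lt_of_lt_of_le (hx x (by simp)) (pvLenMono t x)

lemma pvFold_noop (l : List String) : ∀ (b : String),
    (∀ x ∈ l, PySem.Str.len x ≤ PySem.Str.len b) → l.foldl pvStep' b = b := by
  induction l with
  | nil => intro b _; rfl
  | cons x t ih =>
    intro b h
    simp only [List.foldl_cons]
    have : pvStep' b x = b := by
      simp only [pvStep']; rw [if_neg]; push Not
      exact h x (by simp)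
    rw [this]
    exact ih b (fun y hy => h y (by simp [hy]))

lemma pvRange_natCast : ∀ (d a : Nat),
    PySem.List.pyRange (a : Int) ((a + d : Nat) : Int) = List.map (fun t : Nat => (t : Int)) (List.range' a d) := by
  intro d
  induction d with
  | zero =>
    intro a
    rw [PySem.List.pyRange_one_eq_nil (by exact_mod_cast le_refl a)]
    simp
  | succ d ih =>
    intro a
    rw [PySem.List.pyRange_one_cons (by exact_mod_cast Nat.lt_add_of_pos_right (Nat.succ_pos d))]
    rw [List.range'_succ]
    have h1 : ((a : Int) + 1) = ((a + 1 : Nat) : Int) := by push_cast; ring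
    have h2 : ((a + (d + 1) : Nat) : Int) = (((a + 1) + d : Nat) : Int) := by push_cast; ring
    rw [h1, h2, ih (a + 1)]
    simp

lemma pvGrow_eq (s1 s2 : String) (k : Nat) : ∀ (d L : Nat) (b : String), 1 ≤ L →
    s2.toList.length + 1 - k - L = d → PySem.Str.len b = (L : Int) - 1 →
    pyGrow s1 s2 (s2.toList.length : Int) (k : Int) b (L : Int)
      = (((List.range' L d).map (pvSub s2 k)).filter (fun x => PySem.Str.isIn x s1)).foldl pvStep' b := by
  intro d
  induction d with
  | zero =>
    intro L b hL hd hb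
    rw [pyGrow]
    rw [dif_neg]
    · simp
    · intro hcon
      have := hcon.1
      omega
  | succ d ih =>
    intro L b hL hd hb
    have hkL : k + L ≤ s2.toList.length := by omega
    rw [pyGrow]
    have hslice : PySem.Str.slice s2 (some (k : Int)) (some ((k : Int) + (L : Int))) = pvSub s2 k L := rfl
    by_cases hp : PySem.Str.isIn (pvSub s2 k L) s1 = true
    · rw [dif_pos ⟨by exact_mod_cast hkL, by rw [hslice]; exact hp⟩]
      rw [List.range'_succ]
      simp only [List.map_cons, List.filter_cons]
      rw [if_pos hp]
      simp only [List.foldl_cons]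
      have hlen : PySem.Str.len (pvSub s2 k L) = (L : Int) := by
        rw [pvLen_pvSub]
        have : min L (s2.toList.length - k) = L := by omega
        rw [this]
      have hstep : pvStep' b (pvSub s2 k L) = pvSub s2 k L := by
        simp only [pvStep']; rw [if_pos]; rw [hlen, hb]; omega
      rw [hstep, hslice]
      have hc : ((L : Int) + 1) = ((L + 1 : Nat) : Int) := by push_cast; ring
      rw [hc]
      exact ih (L + 1) (pvSub s2 k L) (by omega) (by omega) (by rw [hlen]; push_cast; ring)
    · rw [dif_neg (by rw [hslice]; intro hcon; exact hp hcon.2)]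
      rw [List.range'_succ]
      simp only [List.map_cons, List.filter_cons]
      rw [if_neg hp]
      have hrest : ((List.range' (L + 1) d).map (pvSub s2 k)).filter (fun x => PySem.Str.isIn x s1) = [] := by
        rw [List.filter_eq_nil_iff]
        intro x hx
        simp only [List.mem_map] at hx
        obtain ⟨L', hL', rfl⟩ := hx
        have hle : L ≤ L' := by
          have := List.mem_range'_1.mp hL'
          omega
        intro hcon
        exact hp (pvClosed s1 s2 k L L' hle hcon)
      rw [hrest]
      rfl

lemma pvGrow_full (s1 s2 : String) (k : Nat) (b : String) :
    pyGrow s1 s2 (s2.toList.length : Int) (k : Int) b (PySem.Str.len b + 1)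
      = (pvInner s1 s2 k).foldl pvStep' b := by
  set m := s2.toList.length with hm
  set lb := b.toList.length with hlb
  have hlen : PySem.Str.len b = (lb : Int) := by rw [PySem.Str.len_eq]
  have hcast : PySem.Str.len b + 1 = ((lb + 1 : Nat) : Int) := by rw [hlen]; push_cast; ring
  rw [hcast]
  -- rewrite the inner list as a map over range' 1 (m - k)
  have hlist : (List.range (m - k)).map (fun t => pvSub s2 k (t + 1))
      = (List.range' 1 (m - k)).map (pvSub s2 k) := by
    rw [List.range'_eq_map_range, List.map_map]
    apply List.map_congr_left
    intro t _
    simp [Nat.add_comm]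
  set j := min lb (m - k) with hj
  have hsplit : List.range' 1 (m - k) = List.range' 1 j ++ List.range' (1 + j) (m - k - j) := by
    have h := @List.range'_append 1 j (m - k - j) 1
    simp only [one_mul] at h
    rw [h]
    congr 1
    omega
  have heq2 : List.range' (1 + j) (m - k - j) = List.range' (lb + 1) (m + 1 - k - (lb + 1)) := by
    by_cases hc : lb ≤ m - k
    · have : j = lb := by omega
      rw [this]
      congr 1 <;> omega
    · have h1 : m - k - j = 0 := by omega
      have h2 : m + 1 - k - (lb + 1) = 0 := by omega
      rw [h1, h2]
      simp
  rw [pvInner, hlist, hsplit, heq2, List.map_append, List.filter_append, List.foldl_append]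
  have hnoop : (((List.range' 1 j).map (pvSub s2 k)).filter (fun x => PySem.Str.isIn x s1)).foldl pvStep' b = b := by
    apply pvFold_noop
    intro x hx
    have hx' := List.mem_filter.mp hx |>.1
    simp only [List.mem_map] at hx'
    obtain ⟨L, hL, rfl⟩ := hx'
    have hLb := List.mem_range'_1.mp hL
    rw [pvLen_pvSub, hlen]
    have : min L (m - k) ≤ lb := by omega
    exact_mod_cast this
  rw [hnoop]
  exact pvGrow_eq s1 s2 k (m + 1 - k - (lb + 1)) (lb + 1) b (by omega) rfl (by rw [hlen]; push_cast; ring)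

lemma pvAll_pos (s1 s2 : String) : ∀ x ∈ pvAll s1 s2, 0 < PySem.Str.len x := by
  intro x hx
  simp only [pvAll, List.mem_flatMap] at hx
  obtain ⟨k, hk, hx⟩ := hx
  have hk' : k < s2.toList.length := List.mem_range.mp hk
  have hx' := List.mem_filter.mp hx |>.1
  simp only [List.mem_map] at hx'
  obtain ⟨t, ht, rfl⟩ := hx'
  have ht' : t < s2.toList.length - k := List.mem_range.mp ht
  rw [pvLen_pvSub]
  have : 0 < min (t + 1) (s2.toList.length - k) := by omega
  exact_mod_cast this

-- A's filtered substring list IS pvAll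
lemma pvInner_eq (s1 s2 : String) (k : Nat) :
    ((PySem.List.pyRange (k : Int) (PySem.Str.len s2)).map (fun j =>
        PySem.Str.slice s2 (some (k : Int)) (some (j + 1)))).filter (fun s => PySem.Str.isIn s s1)
      = pvInner s1 s2 k := by
  set m := s2.toList.length with hm
  have hmk : (PySem.Str.len s2) = ((k + (m - k) : Nat) : Int) ∨ m ≤ k := by
    rw [PySem.Str.len_eq, ← hm]
    by_cases h : k ≤ m
    · left; congr 1; omega
    · right; omega
  rcases hmk with hmk | hmk
  · rw [hmk, pvRange_natCast (m - k) k, List.map_map]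
    have hmap : (List.range' k (m - k)).map ((fun j => PySem.Str.slice s2 (some (k : Int)) (some (j + 1))) ∘ (fun t : Nat => (t : Int)))
        = (List.range (m - k)).map (fun t => pvSub s2 k (t + 1)) := by
      rw [List.range'_eq_map_range, List.map_map]
      apply List.map_congr_left
      intro t _
      simp only [Function.comp, pvSub]
      have hc : ((k + t : Nat) : Int) + 1 = (k : Int) + ((t + 1 : Nat) : Int) := by push_cast; ring
      rw [hc]
    rw [hmap]
    rfl
  · have h0 : m - k = 0 := by omega
    have hr : PySem.List.pyRange (k : Int) (PySem.Str.len s2) = [] := by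
      apply PySem.List.pyRange_one_eq_nil
      rw [PySem.Str.len_eq, ← hm]
      exact_mod_cast hmk
    rw [hr]
    rw [pvInner, ← hm, h0]
    simp

lemma pvA_filter (s1 s2 : String) :
    ((PySem.List.pyRange 0 (PySem.Str.len s2)).flatMap (fun i =>
        (PySem.List.pyRange i (PySem.Str.len s2)).map (fun j =>
          PySem.Str.slice s2 (some i) (some (j + 1))))).filter (fun s => PySem.Str.isIn s s1)
      = pvAll s1 s2 := by
  rw [List.filter_flatMap]
  rw [show PySem.List.pyRange 0 (PySem.Str.len s2) = (List.range s2.toList.length).map (fun t : Nat => (t : Int)) by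
    rw [PySem.Str.len_eq]; exact PySem.List.pyRange_zero_natCast _]
  rw [List.flatMap_map]
  apply List.flatMap_congr
  intro k hk
  exact pvInner_eq s1 s2 k

-- B's outer fold computes pvBest
lemma pvB_best (s1 s2 : String) :
    (PySem.List.pyRange 0 (PySem.Str.len s2)).foldl
        (fun b i => pyGrow s1 s2 (PySem.Str.len s2) i b (PySem.Str.len b + 1)) ""
      = pvBest s1 s2 := by
  set m := s2.toList.length with hm
  rw [PySem.Str.len_eq, ← hm, PySem.List.pyRange_zero_natCast, List.foldl_map]
  rw [pvBest, pvAll, List.foldl_flatMap]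
  apply PySem.List.foldl_congr_mem
  intro b k hk
  exact pvGrow_full s1 s2 k b

lemma pvBest_empty_iff (s1 s2 : String) : pvAll s1 s2 = [] ↔ pvBest s1 s2 = "" := by
  constructor
  · intro h; rw [pvBest, h]; rfl
  · intro h
    by_contra hne
    have := pvNonempty (pvAll s1 s2) hne (pvAll_pos s1 s2)
    rw [← pvBest] at this
    rw [h] at this
    simp [PySem.Str.len_eq] at this

lemma pv_main (str1 str2 : String) : gene_splicing str1 str2 = gene_splicing_alt str1 str2 := by
  unfold gene_splicing gene_splicing_alt
  simp only [PySem.List.foldl_append_if_eq_filter, List.nil_append]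
  rw [pvA_filter, pvB_best]
  by_cases h : pvAll (PySem.Str.upper str1) (PySem.Str.upper str2) = []
  · rw [h]
    have hb : pvBest (PySem.Str.upper str1) (PySem.Str.upper str2) = "" :=
      (pvBest_empty_iff _ _).mp h
    rw [hb]
    simp
  · have hb : ¬ pvBest (PySem.Str.upper str1) (PySem.Str.upper str2) = "" := by
      intro hc
      exact h ((pvBest_empty_iff _ _).mpr hc)
    rw [if_neg (by simp [List.length_eq_zero_iff, h]), if_neg hb]
    rw [pvMaxEq _ h (pvAll_pos _ _)]
    rfl

-- ===== VERDICT (by name: the statement is the Claim_ definition above) =====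
theorem gene_splicing_spec : Claim_equal_gene_splicing := by
  intro str1 str2 _
  unfold Spec_gene_splicing
  exact pv_main str1 str2
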